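-- pv_equiv track=rewrite | github.com/dhnesh12/codechef-solutions | 02-CodeChef-Easy/236--Endgame.py | mcal
-- ===== SOURCE A (Python) =====
-- def mcal(d,h):
--     mi=min(d,h)
--     ma=max(d,h)
--     diff=ma-mi
--     if mi<diff:
--         if mi!=0:return 1+mcal(2*mi,ma)
--         else:return -1
--     if ma==mi:return ma
--     else:return int(ma+1)
-- ===== SOURCE B (Python) =====
-- def mcal(d, h):
--     mi, ma = (d, h) if d <= h else (h, d)
--     if ma <= 2 * mi:
--         return ma if ma == mi else int(ma + 1)
--     if mi == 0:
--         return -1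
--     q = -(-ma // mi)                 # ceil(ma / mi)
--     k = (q - 1).bit_length() - 1     # unique k with 2**k * mi < ma <= 2**(k+1) * mi
--     return k + ma + (0 if mi << k == ma else 1)
-- ===== Notes on version B (the rewrite author's own statement) =====
-- stated objective: alternative
-- what changed: Replaced A's recursive doubling descent by a closed form: the number of doublings is computed directly as bit_length(ceil(ma/mi)-1)-1, so no recursion or loop remains (O(1) arithmetic vs O(log) calls, though too fast for a timing run to distinguish).
import Mathlib
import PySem

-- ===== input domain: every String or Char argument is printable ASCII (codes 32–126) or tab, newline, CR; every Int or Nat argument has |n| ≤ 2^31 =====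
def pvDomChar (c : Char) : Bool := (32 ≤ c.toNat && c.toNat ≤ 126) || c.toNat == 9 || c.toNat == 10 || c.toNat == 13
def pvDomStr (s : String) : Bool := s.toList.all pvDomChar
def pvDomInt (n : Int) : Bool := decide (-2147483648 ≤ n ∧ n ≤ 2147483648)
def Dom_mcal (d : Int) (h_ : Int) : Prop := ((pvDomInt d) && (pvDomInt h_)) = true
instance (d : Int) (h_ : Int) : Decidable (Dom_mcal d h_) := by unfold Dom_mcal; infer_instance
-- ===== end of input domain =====

-- B replaces A's recursion by a closed form: ceiling division + bit_length compute the doubling count directly (no recursion/loop).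


-- ===== PORT A =====
-- A's recursion, made total with a fuel guard only (no algorithm change); within
-- Dom_mcal ∧ Pre_mcal at most ~33 recursive calls occur, so fuel 100 is never exhausted.
def mcalF : Nat → Int → Int → Int
  | 0, _, _ => 0
  | n+1, d, h_ =>
    let mi := min d h_
    let ma := max d h_
    let diff := ma - mi
    if mi < diff then
      if mi ≠ 0 then 1 + mcalF n (2*mi) ma else -1
    else if ma = mi then ma else ma + 1

def mcal (d : Int) (h_ : Int) : Int := mcalF 100 d h_

-- ===== PORT B =====
-- B's closed form on the ordered pair (mi, ma): `mi << k` is `mi <<< k.toNat`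
-- (inside Pre_ the shift count k is ≥ 1, where Python's << never raises).
def mcalCore (mi : Int) (ma : Int) : Int :=
  if ma ≤ 2 * mi then (if ma = mi then ma else ma + 1)
  else if mi = 0 then -1
  else
    let q := -(PySem.Int.floordiv (-ma) mi)
    let k := (PySem.Int.bitLength (q - 1) : Int) - 1
    k + ma + (if mi <<< k.toNat = ma then 0 else 1)

def mcal_alt (d : Int) (h_ : Int) : Int :=
  let p := if d ≤ h_ then (d, h_) else (h_, d)
  mcalCore p.1 p.2

-- ===== PRECONDITION & SPEC =====
-- Pre_ excludes min(d,h) < 0, where the Python A never terminates (RecursionError).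
def Pre_mcal (d : Int) (h_ : Int) : Prop := 0 ≤ d ∧ 0 ≤ h_
instance (d : Int) (h_ : Int) : Decidable (Pre_mcal d h_) := by unfold Pre_mcal; infer_instance
def pvWitness_mcal : Int × Int := (3, 7)

def Spec_mcal (d : Int) (h_ : Int) (out : Int) : Prop := out = mcal_alt d h_
instance (d : Int) (h_ : Int) (out : Int) : Decidable (Spec_mcal d h_ out) := by unfold Spec_mcal; infer_instance

-- ===== CLAIM (what is proved, stated in full; the proofs are below) =====
def Claim_equal_mcal : Prop := ∀ (d : Int) (h_ : Int), Dom_mcal d h_ → Pre_mcal d h_ → Spec_mcal d h_ (mcal d h_)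

-- ===== LEMMAS AND PROOFS =====

-- mcal_alt, expressed through min/max.
theorem mcal_alt_minmax (d h_ : Int) : mcal_alt d h_ = mcalCore (min d h_) (max d h_) := by
  unfold mcal_alt
  rw [min_def, max_def]
  split <;> rfl

-- Characterisation of B's closed-form branch: the exponent k computed from
-- ceil(ma/mi) via bit_length is the unique k with 2^k·mi < ma ≤ 2^(k+1)·mi.
theorem mcalCore_of_lt {mi ma : Int} (hmi : 0 < mi) (hlt : 2 * mi < ma) :
    ∃ k : Nat, 1 ≤ k ∧ 2 ^ k * mi < ma ∧ ma ≤ 2 ^ (k + 1) * mi ∧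
      mcalCore mi ma = (k : Int) + ma + (if mi * 2 ^ k = ma then 0 else 1) := by
  have hq := (PySem.Int.neg_floordiv_neg_eq_iff_of_pos (a := ma) (b := mi)
      (q := -(PySem.Int.floordiv (-ma) mi)) hmi).mp rfl
  set q : Int := -(PySem.Int.floordiv (-ma) mi) with hqdef
  obtain ⟨hqlo, hqhi⟩ := hq
  -- q ≥ 3
  have hq3 : 3 ≤ q := by
    have h2 : 2 * mi < q * mi := lt_of_lt_of_le hlt hqhi
    have : (2 : Int) < q := lt_of_mul_lt_mul_right h2 (le_of_lt hmi)
    omega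
  have hq1ne : q - 1 ≠ 0 := by omega
  set K : Nat := PySem.Int.bitLength (q - 1) with hKdef
  have hub : (q - 1).natAbs < 2 ^ K := PySem.Int.lt_two_pow_bitLength (q - 1)
  have hlb : 2 ^ (K - 1) ≤ (q - 1).natAbs := PySem.Int.two_pow_bitLength_le (q - 1) hq1ne
  have habs : ((q - 1).natAbs : Int) = q - 1 := Int.natAbs_of_nonneg (by omega)
  have hK2 : 2 ≤ K := by
    rcases Nat.lt_or_ge K 2 with hc | hc
    · exfalso
      have hle : (2:Nat) ^ K ≤ 2 ^ 1 := Nat.pow_le_pow_right (by norm_num) (by omega)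
      omega
    · exact hc
  refine ⟨K - 1, by omega, ?_, ?_, ?_⟩
  · -- 2^(K-1) * mi < ma
    have h1 : ((2 : Int) ^ (K - 1)) ≤ q - 1 := by
      have := hlb
      rw [← habs]; exact_mod_cast this
    calc 2 ^ (K - 1) * mi ≤ (q - 1) * mi := by
          exact mul_le_mul_of_nonneg_right h1 (le_of_lt hmi)
      _ < ma := hqlo
  · -- ma ≤ 2^(K-1+1) * mi
    have h2 : q ≤ (2 : Int) ^ (K - 1 + 1) := by
      have : (q - 1 : Int) < 2 ^ K := by
        rw [← habs]; exact_mod_cast hub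
      have hKeq : K - 1 + 1 = K := by omega
      rw [hKeq]; omega
    calc ma ≤ q * mi := hqhi
      _ ≤ 2 ^ (K - 1 + 1) * mi := mul_le_mul_of_nonneg_right h2 (le_of_lt hmi)
  · -- the returned value
    have hnot1 : ¬ ma ≤ 2 * mi := by omega
    have hnot2 : mi ≠ 0 := by omega
    have hk : ((PySem.Int.bitLength (q - 1) : Int) - 1) = ((K - 1 : Nat) : Int) := by
      rw [← hKdef]; omega
    have hkt : (((K - 1 : Nat) : Int)).toNat = K - 1 := Int.toNat_natCast _
    simp only [mcalCore, if_neg hnot1, if_neg hnot2, ← hqdef, hk, hkt,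
      Int.shiftLeft_eq]

-- Uniqueness of the exponent gives A's one-step recurrence for B's closed form.
theorem mcalCore_step {mi ma : Int} (hmi : 0 < mi) (hlt : 2 * mi < ma) :
    mcalCore mi ma = 1 + mcalCore (2 * mi) ma := by
  obtain ⟨k, hk1, hklo, hkhi, hval⟩ := mcalCore_of_lt hmi hlt
  by_cases hsm : ma ≤ 2 * (2 * mi)
  · -- one doubling left: k = 1 and the child is in its base branch
    have hk2 : k < 2 := by
      have h1 : (2 : Int) ^ k * mi < 2 ^ 2 * mi := by
        calc (2:Int) ^ k * mi < ma := hklo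
          _ ≤ 2 ^ 2 * mi := by push_cast; linarith
      have h2 : ((2 : Nat) : Int) ^ k < ((2:Nat) : Int) ^ 2 :=
        lt_of_mul_lt_mul_right (by push_cast at h1 ⊢; linarith) (le_of_lt hmi)
      have := pow_lt_pow_iff_right₀ (a := ((2:Nat):Int)) (by norm_num) |>.mp h2
      exact this
    have hkeq : k = 1 := by omega
    subst hkeq
    have hne : ma ≠ 2 * mi := by omega
    rw [hval, mcalCore]
    rw [if_pos hsm, if_neg (by omega : ¬ ma = 2 * mi)]
    rw [if_neg (by push_cast; omega : ¬ mi * 2 ^ 1 = ma)]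
    push_cast; ring
  · -- more doublings: child exponent is k - 1
    rw [not_le] at hsm
    obtain ⟨j, hj1, hjlo, hjhi, hjval⟩ :=
      mcalCore_of_lt (by omega : (0:Int) < 2 * mi) (by omega : 2 * (2 * mi) < ma)
    -- 2^(j+1)·mi < ma ≤ 2^(j+2)·mi  and  2^k·mi < ma ≤ 2^(k+1)·mi  force k = j+1
    have hjlo' : (2 : Int) ^ (j + 1) * mi < ma := by
      calc (2:Int) ^ (j+1) * mi = 2 ^ j * (2 * mi) := by ring
        _ < ma := hjlo
    have hjhi' : ma ≤ (2 : Int) ^ (j + 2) * mi := by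
      calc ma ≤ 2 ^ (j+1) * (2 * mi) := hjhi
        _ = 2 ^ (j + 2) * mi := by ring
    have hkj : k = j + 1 := by
      have hA : (2 : Int) ^ k < 2 ^ (j + 2) := by
        have : (2:Int) ^ k * mi < 2 ^ (j+2) * mi := lt_of_lt_of_le hklo hjhi'
        exact lt_of_mul_lt_mul_right this (le_of_lt hmi)
      have hB : (2 : Int) ^ (j + 1) < 2 ^ (k + 1) := by
        have : (2:Int) ^ (j+1) * mi < 2 ^ (k+1) * mi := lt_of_lt_of_le hjlo' hkhi
        exact lt_of_mul_lt_mul_right this (le_of_lt hmi)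
      have hA' : k < j + 2 := by
        have := pow_lt_pow_iff_right₀ (a := ((2:Nat):Int)) (by norm_num) |>.mp (by push_cast at hA ⊢; exact hA)
        exact this
      have hB' : j + 1 < k + 1 := by
        have := pow_lt_pow_iff_right₀ (a := ((2:Nat):Int)) (by norm_num) |>.mp (by push_cast at hB ⊢; exact hB)
        exact this
      omega
    rw [hval, hjval, hkj]
    have hshift : mi * 2 ^ (j + 1) = 2 * mi * 2 ^ j := by ring
    rw [hshift]
    push_cast; ring

-- One-step unfolding of the fuel recursion (applied once by rw).
theorem mcalF_succ (m : Nat) (d h_ : Int) : mcalF (m + 1) d h_ =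
    (if min d h_ < max d h_ - min d h_ then
       (if min d h_ ≠ 0 then 1 + mcalF m (2 * min d h_) (max d h_) else -1)
     else if max d h_ = min d h_ then max d h_ else max d h_ + 1) := rfl

-- The fuel recursion of A equals B's closed form whenever the fuel covers the
-- doubling count, i.e. max ≤ 2^n · max(min,1).
theorem mcalF_eq_core (n : Nat) : ∀ (d h_ : Int), 0 ≤ d → 0 ≤ h_ →
    max d h_ ≤ 2 ^ n * max (min d h_) 1 →
    mcalF (n + 1) d h_ = mcalCore (min d h_) (max d h_) := by
  induction n with
  | zero =>
    intro d h_ hd hh hbound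
    rw [mcalF_succ]
    split_ifs with h1 h2 h3
    · -- recursion branch is unreachable with fuel bound 2^0
      exfalso
      have hmi : 0 < min d h_ := by omega
      have : max (min d h_) 1 = min d h_ := by omega
      rw [this] at hbound
      have : min d h_ ≤ max d h_ := min_le_max
      omega
    · -- mi = 0 < ma : both give -1
      rw [mcalCore, if_neg (by omega), if_pos (show min d h_ = 0 by omega)]
    · rw [mcalCore, if_pos (by omega), if_pos h3]
    · rw [mcalCore, if_pos (by omega), if_neg h3]
  | succ n ih =>
    intro d h_ hd hh hbound
    rw [mcalF_succ]
    split_ifs with h1 h2 h3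
    · -- recursive case
      have hmi : 0 < min d h_ := by omega
      have hlt : 2 * min d h_ < max d h_ := by omega
      have hmin2 : min (2 * min d h_) (max d h_) = 2 * min d h_ := by omega
      have hmax2 : max (2 * min d h_) (max d h_) = max d h_ := by omega
      have hb2 : max (2 * min d h_) (max d h_) ≤
          2 ^ n * max (min (2 * min d h_) (max d h_)) 1 := by
        rw [hmin2, hmax2]
        have h1' : max (min d h_) 1 = min d h_ := by omega
        rw [h1'] at hbound
        have : (2:Int) ^ (n+1) * min d h_ = 2 ^ n * (2 * min d h_) := by ring
        have h2' : max (2 * min d h_) 1 = 2 * min d h_ := by omega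
        rw [h2']; omega
      rw [ih (2 * min d h_) (max d h_) (by omega) (by omega) hb2, hmin2, hmax2]
      rw [mcalCore_step hmi hlt]
    · rw [mcalCore, if_neg (by omega), if_pos (show min d h_ = 0 by omega)]
    · rw [mcalCore, if_pos (by omega), if_pos h3]
    · rw [mcalCore, if_pos (by omega), if_neg h3]

-- ===== VERDICT (by name: the statement is the Claim_ definition above) =====
theorem mcal_spec : Claim_equal_mcal := by
  intro d h_ hdom hpre
  obtain ⟨hd, hh⟩ := hpre
  have hbounds : d ≤ 2147483648 ∧ h_ ≤ 2147483648 := by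
    simp only [Dom_mcal, pvDomInt, Bool.and_eq_true, decide_eq_true_eq] at hdom
    omega
  unfold Spec_mcal mcal
  rw [mcal_alt_minmax]
  have hbound : max d h_ ≤ 2 ^ 99 * max (min d h_) 1 := by
    have h1 : (1 : Int) ≤ max (min d h_) 1 := le_max_right _ _
    have h2 : (2:Int) ^ 99 * 1 ≤ 2 ^ 99 * max (min d h_) 1 :=
      mul_le_mul_of_nonneg_left h1 (by positivity)
    have h3 : max d h_ ≤ 2147483648 := by omega
    have h4 : (2147483648 : Int) ≤ 2 ^ 99 := by norm_num
    omega
  exact mcalF_eq_core 99 d h_ hd hh hbound
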